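-- pv_equiv track=rewrite | github.com/stanleypangg/Leetcode | 3170-find-indices-with-index-and-value-difference-ii/3170-find-indices-with-index-and-value-difference-ii.py | findIndices
-- ===== SOURCE A (Python) =====
-- from typing import List
--
-- def findIndices(nums: List[int], indexDifference: int, valueDifference: int) -> List[int]:
--     n = len(nums)
--     max_index = min_index = 0
--     i = 0
--     j = indexDifference
--     while j < n:
--         if nums[min_index] > nums[i]:
--             min_index = i
--         elif nums[max_index] < nums[i]:
--             max_index = i
--
--         if abs(nums[min_index] - nums[j]) >= valueDifference:
--             return [min_index, j]
--         if abs(nums[max_index] - nums[j]) >= valueDifference: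
--             return [max_index, j]
--         i += 1
--         j += 1
--     return [-1, -1]
-- ===== SOURCE B (Python) =====
-- from typing import List
--
-- def findIndices(nums: List[int], indexDifference: int, valueDifference: int) -> List[int]:
--     n = len(nums)
--     # pass 1: prefix first-occurrence extremum index tables
--     mins = []
--     maxs = []
--     mi = ma = 0
--     for i in range(n):
--         if nums[mi] > nums[i]:
--             mi = i
--         if nums[ma] < nums[i]:
--             ma = i
--         mins.append(mi)
--         maxs.append(ma)
--     # pass 2: scan candidate j's against the precomputed tables
--     for j in range(indexDifference, n):
--         k = j - indexDifference
--         if abs(nums[mins[k]] - nums[j]) >= valueDifference: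
--             return [mins[k], j]
--         if abs(nums[maxs[k]] - nums[j]) >= valueDifference:
--             return [maxs[k], j]
--     return [-1, -1]
-- ===== Notes on version B (the rewrite author's own statement) =====
-- stated objective: alternative
-- what changed: Replaces A's single pass carrying min/max-index state interleaved with the pair check by two staged passes: pass one builds complete prefix-extremum index tables (mins/maxs per prefix length), pass two scans the candidate j's against the precomputed tables.
-- outside the precondition, e.g. on findIndices([1, 5], -1, 3): A returns [0, -1], B returns [0, -1]; on findIndices([1, 5, 2], -2, 10): A raises IndexError, B raises IndexError
import Mathlib
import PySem

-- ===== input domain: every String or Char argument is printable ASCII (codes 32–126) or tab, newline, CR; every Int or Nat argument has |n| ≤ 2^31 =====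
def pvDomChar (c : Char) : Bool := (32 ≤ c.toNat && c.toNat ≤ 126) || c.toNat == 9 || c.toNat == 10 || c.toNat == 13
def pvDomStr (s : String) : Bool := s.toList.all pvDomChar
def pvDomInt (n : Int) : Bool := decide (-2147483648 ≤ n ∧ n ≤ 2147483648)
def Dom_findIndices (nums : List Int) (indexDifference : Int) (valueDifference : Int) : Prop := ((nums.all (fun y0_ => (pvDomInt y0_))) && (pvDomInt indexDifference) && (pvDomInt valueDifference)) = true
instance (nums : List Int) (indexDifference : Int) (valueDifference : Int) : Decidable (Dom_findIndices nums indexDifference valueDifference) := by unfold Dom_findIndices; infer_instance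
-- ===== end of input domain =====

-- B replaces A's single pass (extremum state interleaved with the check) by two staged passes:
-- pass one precomputes the prefix-extremum index tables, pass two scans the candidate j's
-- against the tables (alternative decomposition, not faster).

-- ===== PORT A =====
-- A's while loop, fuel = number of remaining iterations (n - j).  Indexing uses
-- pyGet? … |>.getD 0; under Pre_ (0 ≤ indexDifference) every index Python reads is in
-- range, so the default is never used (Python raises only outside Pre_).
def findIndicesLoop (nums : List Int) (valueDifference : Int) (minIdx maxIdx i j : Int) : Nat → List Int
  | 0 => [-1, -1]
  | fuel + 1 =>
    let vi := (PySem.List.pyGet? nums i).getD 0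
    let minIdx' := if (PySem.List.pyGet? nums minIdx).getD 0 > vi then i else minIdx
    let maxIdx' := if (PySem.List.pyGet? nums minIdx).getD 0 > vi then maxIdx
      else if (PySem.List.pyGet? nums maxIdx).getD 0 < vi then i else maxIdx
    let vj := (PySem.List.pyGet? nums j).getD 0
    if |(PySem.List.pyGet? nums minIdx').getD 0 - vj| ≥ valueDifference then [minIdx', j]
    else if |(PySem.List.pyGet? nums maxIdx').getD 0 - vj| ≥ valueDifference then [maxIdx', j]
    else findIndicesLoop nums valueDifference minIdx' maxIdx' (i + 1) (j + 1) fuel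

def findIndices (nums : List Int) (indexDifference : Int) (valueDifference : Int) : List Int :=
  findIndicesLoop nums valueDifference 0 0 0 indexDifference
    ((nums.length : Int) - indexDifference).toNat

-- ===== PORT B =====
-- pass 1: Source B's 'for i in range(n)' appending the running first-occurrence min/max index;
-- the indices are nonnegative by construction, so they are carried as Nat and nums[idx]
-- is nums.getD idx 0 (always in range).
def prefixExtrema (nums : List Int) : List Nat × List Nat :=
  let st := (List.range nums.length).foldl
    (fun (s : List Nat × List Nat × Nat × Nat) i =>
      let mi := if nums.getD s.2.2.1 0 > nums.getD i 0 then i else s.2.2.1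
      let ma := if nums.getD s.2.2.2 0 < nums.getD i 0 then i else s.2.2.2
      (s.1 ++ [mi], s.2.1 ++ [ma], mi, ma))
    (([] : List Nat), ([] : List Nat), 0, 0)
  (st.1, st.2.1)

-- pass 2: Source B's 'for j in range(indexDifference, n)', fuel = n - j; k = j - indexDifference
-- is a nonnegative in-range table index.
def findIndicesAltScan (nums : List Int) (indexDifference valueDifference : Int)
    (mins maxs : List Nat) (j : Int) : Nat → List Int
  | 0 => [-1, -1]
  | fuel + 1 =>
    let k := (j - indexDifference).toNat
    let mi := mins.getD k 0
    let ma := maxs.getD k 0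
    let vj := (PySem.List.pyGet? nums j).getD 0
    if |nums.getD mi 0 - vj| ≥ valueDifference then [(mi : Int), j]
    else if |nums.getD ma 0 - vj| ≥ valueDifference then [(ma : Int), j]
    else findIndicesAltScan nums indexDifference valueDifference mins maxs (j + 1) fuel

def findIndices_alt (nums : List Int) (indexDifference : Int) (valueDifference : Int) : List Int :=
  let t := prefixExtrema nums
  findIndicesAltScan nums indexDifference valueDifference t.1 t.2 indexDifference
    ((nums.length : Int) - indexDifference).toNat

-- ===== PRECONDITION & SPEC =====
-- Pre_ excludes negative indexDifference, outside the problem's natural domain: there A's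
-- negative j/i hit Python's negative-index wraparound (accidental values) or an IndexError.
def Pre_findIndices (nums : List Int) (indexDifference : Int) (valueDifference : Int) : Prop :=
  0 ≤ indexDifference
instance (nums : List Int) (indexDifference : Int) (valueDifference : Int) : Decidable (Pre_findIndices nums indexDifference valueDifference) := by unfold Pre_findIndices; infer_instance

def pvWitness_findIndices : List Int × Int × Int := ([5, 1, 4, 1], 2, 4)

def Spec_findIndices (nums : List Int) (indexDifference : Int) (valueDifference : Int) (out : List Int) : Prop := out = findIndices_alt nums indexDifference valueDifference
instance (nums : List Int) (indexDifference : Int) (valueDifference : Int) (out : List Int) : Decidable (Spec_findIndices nums indexDifference valueDifference out) := by unfold Spec_findIndices; infer_instance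

-- ===== CLAIM (what is proved, stated in full; the proofs are below) =====
def Claim_equal_findIndices : Prop := ∀ (nums : List Int) (indexDifference : Int) (valueDifference : Int), Dom_findIndices nums indexDifference valueDifference → Pre_findIndices nums indexDifference valueDifference → Spec_findIndices nums indexDifference valueDifference (findIndices nums indexDifference valueDifference)

-- ===== LEMMAS AND PROOFS =====

-- first-occurrence extremum index of the length-k prefix, as the per-element update folded over 0..k-1
def pvFmin (nums : List Int) (k : Nat) : Nat :=
  (List.range k).foldl (fun m i => if nums.getD m 0 > nums.getD i 0 then i else m) 0
def pvFmax (nums : List Int) (k : Nat) : Nat :=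
  (List.range k).foldl (fun m i => if nums.getD m 0 < nums.getD i 0 then i else m) 0

theorem pvFmin_succ (nums : List Int) (k : Nat) :
    pvFmin nums (k + 1) = if nums.getD (pvFmin nums k) 0 > nums.getD k 0 then k else pvFmin nums k := by
  simp [pvFmin, List.range_succ]

theorem pvFmax_succ (nums : List Int) (k : Nat) :
    pvFmax nums (k + 1) = if nums.getD (pvFmax nums k) 0 < nums.getD k 0 then k else pvFmax nums k := by
  simp [pvFmax, List.range_succ]

theorem pvFmax_lt (nums : List Int) (k : Nat) (hk : 0 < k) : pvFmax nums k < k := by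
  induction k with
  | zero => omega
  | succ k ih =>
    rw [pvFmax_succ]
    rcases Nat.eq_zero_or_pos k with h | h
    · subst h; simp [pvFmax]
    · split
      · omega
      · exact Nat.lt_succ_of_lt (ih h)

theorem pvFmin_min (nums : List Int) (k : Nat) :
    ∀ i < k, nums.getD (pvFmin nums k) 0 ≤ nums.getD i 0 := by
  induction k with
  | zero => intro i hi; exact absurd hi (Nat.not_lt_zero i)
  | succ k ih =>
    intro i hi
    rw [pvFmin_succ]
    by_cases h : nums.getD (pvFmin nums k) 0 > nums.getD k 0
    · rw [if_pos h]
      rcases Nat.lt_succ_iff_lt_or_eq.mp hi with h' | h'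
      · exact le_of_lt (lt_of_lt_of_le h (ih i h'))
      · subst h'; exact le_refl _
    · rw [if_neg h]
      rcases Nat.lt_succ_iff_lt_or_eq.mp hi with h' | h'
      · exact ih i h'
      · subst h'; exact not_lt.mp h

-- pass one of B builds exactly the tables of prefix extremum indices
theorem prefixExtrema_eq (nums : List Int) :
    (List.range nums.length).foldl
      (fun (s : List Nat × List Nat × Nat × Nat) i =>
        let mi := if nums.getD s.2.2.1 0 > nums.getD i 0 then i else s.2.2.1
        let ma := if nums.getD s.2.2.2 0 < nums.getD i 0 then i else s.2.2.2
        (s.1 ++ [mi], s.2.1 ++ [ma], mi, ma))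
      (([] : List Nat), ([] : List Nat), 0, 0)
    = ((List.range nums.length).map (fun t => pvFmin nums (t + 1)),
       (List.range nums.length).map (fun t => pvFmax nums (t + 1)),
       pvFmin nums nums.length, pvFmax nums nums.length) := by
  suffices h : ∀ n, (List.range n).foldl
      (fun (s : List Nat × List Nat × Nat × Nat) i =>
        let mi := if nums.getD s.2.2.1 0 > nums.getD i 0 then i else s.2.2.1
        let ma := if nums.getD s.2.2.2 0 < nums.getD i 0 then i else s.2.2.2
        (s.1 ++ [mi], s.2.1 ++ [ma], mi, ma))
      (([] : List Nat), ([] : List Nat), 0, 0)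
    = ((List.range n).map (fun t => pvFmin nums (t + 1)),
       (List.range n).map (fun t => pvFmax nums (t + 1)),
       pvFmin nums n, pvFmax nums n) from h nums.length
  intro n
  induction n with
  | zero => simp [pvFmin, pvFmax]
  | succ n ih =>
    rw [List.range_succ, List.foldl_append, ih]
    simp [pvFmin_succ, pvFmax_succ]

-- the two passes of B, driven in lock-step with A's single loop
theorem pv_loop_eq (nums : List Int) (d v : Int) :
    ∀ (fuel k : Nat), k + fuel ≤ nums.length →
      findIndicesLoop nums v (pvFmin nums k : Int) (pvFmax nums k : Int) (k : Int) (d + k) fuel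
        = findIndicesAltScan nums d v
            ((List.range nums.length).map (fun t => pvFmin nums (t + 1)))
            ((List.range nums.length).map (fun t => pvFmax nums (t + 1)))
            (d + k) fuel := by
  intro fuel
  induction fuel with
  | zero => intro k hk; rfl
  | succ fuel ih =>
    intro k hk
    have hkn : k < nums.length := by omega
    -- A's incremental update equals the table entry for prefix length k+1
    have hstepmin : (if nums.getD (pvFmin nums k) 0 > nums.getD k 0 then ((k : Nat) : Int)
        else ((pvFmin nums k : Nat) : Int)) = ((pvFmin nums (k + 1) : Nat) : Int) := by
      rw [pvFmin_succ]
      exact (apply_ite (fun n : Nat => (n : Int)) _ k (pvFmin nums k)).symm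
    have hstepmax : (if nums.getD (pvFmin nums k) 0 > nums.getD k 0 then ((pvFmax nums k : Nat) : Int)
        else if nums.getD (pvFmax nums k) 0 < nums.getD k 0 then ((k : Nat) : Int)
        else ((pvFmax nums k : Nat) : Int)) = ((pvFmax nums (k + 1) : Nat) : Int) := by
      rw [pvFmax_succ]
      by_cases h : nums.getD (pvFmin nums k) 0 > nums.getD k 0
      · rw [if_pos h]
        have hne : ¬ nums.getD (pvFmax nums k) 0 < nums.getD k 0 := by
          rcases Nat.eq_zero_or_pos k with hz | hz
          · subst hz; simp [pvFmin] at h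
          · have := pvFmin_min nums k (pvFmax nums k) (pvFmax_lt nums k hz)
            omega
        rw [if_neg hne]
      · rw [if_neg h]
        exact (apply_ite (fun n : Nat => (n : Int)) _ k (pvFmax nums k)).symm
    -- B's table lookups at index k = j - d
    have hknat : (d + (k : Int) - d).toNat = k := by omega
    have hlen : k < ((List.range nums.length).map (fun t => pvFmin nums (t + 1))).length := by
      simpa using hkn
    have hmi : ((List.range nums.length).map (fun t => pvFmin nums (t + 1))).getD k 0
        = pvFmin nums (k + 1) := by
      rw [List.getD_eq_getElem _ _ hlen]; simp
    have hlen' : k < ((List.range nums.length).map (fun t => pvFmax nums (t + 1))).length := by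
      simpa using hkn
    have hma : ((List.range nums.length).map (fun t => pvFmax nums (t + 1))).getD k 0
        = pvFmax nums (k + 1) := by
      rw [List.getD_eq_getElem _ _ hlen']; simp
    simp only [findIndicesLoop, findIndicesAltScan]
    rw [hknat, hmi, hma]
    simp only [PySem.List.pyGet?_natCast, ← List.getD_eq_getElem?_getD]
    rw [hstepmin, hstepmax]
    simp only [PySem.List.pyGet?_natCast, ← List.getD_eq_getElem?_getD]
    have hca : ((k : Int) + 1) = ((k + 1 : Nat) : Int) := by push_cast; ring
    have hcb : d + (k : Int) + 1 = d + ((k + 1 : Nat) : Int) := by push_cast; ring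
    split_ifs with hc1 hc2
    · rfl
    · rfl
    · rw [hca, hcb]
      exact ih (k + 1) (by omega)

-- ===== VERDICT (by name: the statement is the Claim_ definition above) =====
theorem findIndices_spec : Claim_equal_findIndices := by
  intro nums d v _ hpre
  unfold Spec_findIndices findIndices findIndices_alt prefixExtrema
  rw [prefixExtrema_eq]
  have hd : (0 : Int) ≤ d := hpre
  have h := pv_loop_eq nums d v ((nums.length : Int) - d).toNat 0 (by omega)
  simpa [pvFmin, pvFmax] using h
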